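-- pv_equiv track=rewrite | github.com/apoorav21/AI-projects | tictactoe.py | check_firstDiag
-- ===== SOURCE A (Python) =====
-- def check_firstDiag(board, player):
--     count = 0
--     for row in range(len(board)):
--         for col in range(len(board[row])):
--             if row == col and board[row][col] == player:
--                 count += 1
--     if count == 3:
--         return True
--     else:
--         return False
-- ===== SOURCE B (Python) =====
-- def check_firstDiag(board, player):
--     count = 0
--     for i, row in enumerate(board):
--         if i < len(row) and row[i] == player:
--             count += 1
--     return count == 3
-- ===== Notes on version B (the rewrite author's own statement) =====
-- stated objective: simpler
-- what changed: Replaced A's nested scan of every cell of every row (testing row==col per cell) by a single structural pass over the rows carrying a diagonal index, counting row[i]==player with a length guard and comparing to 3.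
import Mathlib
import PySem

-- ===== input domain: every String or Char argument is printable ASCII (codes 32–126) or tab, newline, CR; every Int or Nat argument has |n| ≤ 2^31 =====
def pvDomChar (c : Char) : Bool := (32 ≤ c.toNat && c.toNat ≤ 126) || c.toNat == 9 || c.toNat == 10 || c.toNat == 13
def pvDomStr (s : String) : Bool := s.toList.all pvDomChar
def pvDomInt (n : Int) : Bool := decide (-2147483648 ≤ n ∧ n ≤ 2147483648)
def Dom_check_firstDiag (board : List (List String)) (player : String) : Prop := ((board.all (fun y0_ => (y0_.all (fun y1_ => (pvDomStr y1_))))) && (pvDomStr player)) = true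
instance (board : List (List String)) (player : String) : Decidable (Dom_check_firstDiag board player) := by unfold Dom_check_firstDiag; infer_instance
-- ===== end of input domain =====

-- ===== PORT A =====
-- B replaces A's full nested cell scan by one structural pass over the rows with a diagonal index (objective: simpler).
def check_firstDiag (board : List (List String)) (player : String) : Bool :=
  let count :=
    (List.range board.length).foldl (fun cnt row =>
      (List.range (board.getD row []).length).foldl (fun cnt col =>
        if row = col ∧ (board.getD row []).getD col "" = player then cnt + 1 else cnt) cnt) 0
  if count = 3 then true else false

-- ===== PORT B =====
-- the loop body of Source B: walk the rows, i is the running diagonal index, count the hits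
def diagCount (rows : List (List String)) (player : String) (i : Nat) : Nat :=
  match rows with
  | [] => 0
  | r :: rest =>
      (if i < r.length ∧ r.getD i "" = player then 1 else 0) + diagCount rest player (i + 1)

def check_firstDiag_alt (board : List (List String)) (player : String) : Bool :=
  diagCount board player 0 == 3

-- ===== PRECONDITION & SPEC =====
def Spec_check_firstDiag (board : List (List String)) (player : String) (out : Bool) : Prop := out = check_firstDiag_alt board player
instance (board : List (List String)) (player : String) (out : Bool) : Decidable (Spec_check_firstDiag board player out) := by unfold Spec_check_firstDiag; infer_instance

-- ===== CLAIM (what is proved, stated in full; the proofs are below) =====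
def Claim_equal_check_firstDiag : Prop := ∀ (board : List (List String)) (player : String), Dom_check_firstDiag board player → Spec_check_firstDiag board player (check_firstDiag board player)

-- ===== LEMMAS AND PROOFS =====

-- inner loop of A: fold with an if-indicator accumulates countP
theorem foldl_indicator (p : Nat → Prop) [DecidablePred p] (l : List Nat) (cnt : Nat) :
    l.foldl (fun c i => if p i then c + 1 else c) cnt = cnt + l.countP (fun i => decide (p i)) := by
  induction l generalizing cnt with
  | nil => simp
  | cons a t ih =>
    by_cases h : p a
    · simp [h, ih]; omega
    · simp [h, ih]

-- A's inner row-scan contributes exactly the diagonal indicator of that row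
theorem countP_range_eq_single (n row : Nat) (q : Nat → Prop) [DecidablePred q] :
    (List.range n).countP (fun col => decide (row = col ∧ q col))
      = if row < n ∧ q row then 1 else 0 := by
  induction n with
  | zero => simp
  | succ m ih =>
    rw [List.range_succ, List.countP_append, ih]
    by_cases hr : row = m
    · subst hr
      by_cases hq : q row <;> simp [hq]
    · have : ¬ (row = m ∧ q m) := fun h => hr h.1
      by_cases hlt : row < m
      · simp [this, hlt, Nat.lt_succ_of_lt hlt]
      · have : ¬ row < m + 1 := by omega
        simp [*]

-- diagCount over a suffix equals the sum of diagonal indicators read by index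
theorem diagCount_eq_sum (player : String) (rows : List (List String)) (i : Nat) :
    diagCount rows player i
      = ((List.range rows.length).map (fun j =>
          if i + j < (rows.getD j []).length ∧ (rows.getD j []).getD (i + j) "" = player then 1 else 0)).sum := by
  induction rows generalizing i with
  | nil => simp [diagCount]
  | cons r rest ih =>
    rw [diagCount, ih (i + 1)]
    rw [List.length_cons, List.range_succ_eq_map, List.map_cons, List.map_map, List.sum_cons]
    congr 1
    refine congrArg List.sum (List.map_congr_left ?_)
    intro j hj
    have h : i + (j + 1) = i + 1 + j := by omega
    simp [Function.comp, h]

-- A's whole double loop computes exactly diagCount board player 0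
theorem count_eq (board : List (List String)) (player : String) :
    (List.range board.length).foldl (fun cnt row =>
      (List.range (board.getD row []).length).foldl (fun cnt col =>
        if row = col ∧ (board.getD row []).getD col "" = player then cnt + 1 else cnt) cnt) 0
    = diagCount board player 0 := by
  have step : ∀ (cnt row : Nat),
      (List.range (board.getD row []).length).foldl (fun cnt col =>
        if row = col ∧ (board.getD row []).getD col "" = player then cnt + 1 else cnt) cnt
      = cnt + (if row < (board.getD row []).length ∧ (board.getD row []).getD row "" = player then 1 else 0) := by
    intro cnt row
    rw [foldl_indicator (fun col => row = col ∧ (board.getD row []).getD col "" = player),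
        countP_range_eq_single]
  have gen : ∀ (l : List Nat) (cnt : Nat),
      l.foldl (fun cnt row =>
        (List.range (board.getD row []).length).foldl (fun cnt col =>
          if row = col ∧ (board.getD row []).getD col "" = player then cnt + 1 else cnt) cnt) cnt
      = cnt + (l.map (fun row =>
          if row < (board.getD row []).length ∧ (board.getD row []).getD row "" = player then 1 else 0)).sum := by
    intro l
    induction l with
    | nil => simp
    | cons a t ih =>
      intro cnt
      rw [List.foldl_cons, step, ih, List.map_cons, List.sum_cons]
      omega
  rw [gen, diagCount_eq_sum]
  simp

-- ===== VERDICT (by name: the statement is the Claim_ definition above) =====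
theorem check_firstDiag_spec : Claim_equal_check_firstDiag := by
  intro board player _
  unfold Spec_check_firstDiag check_firstDiag check_firstDiag_alt
  simp only [count_eq]
  generalize diagCount board player 0 = n
  by_cases h : n = 3 <;> simp [h]
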